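-- pv_equiv track=rewrite | github.com/ZR000X/ObsTools | obstools.py | reduce_to_cycles
-- ===== SOURCE A (Python) =====
-- from copy import deepcopy
--
-- def reduce_to_cycles(dictionary, cont=True):
--     """
--     Reduces the dictionary object to be only those items that are involved in cycles
--
--     cont: remove self-referencing
--     """
--     def helper(d):
--         if type(d) is dict:
--             d1 = deepcopy(d)
--             o = False
--             for key, values in d.items():
--                 if len(values) == 0:
--                     for key0, values0 in d1.items():
--                         if key in values0:
--                             values0.remove(key)
--                     d1.pop(key)
--                     o = True
--             return [d1,o]
--         elif type(d) is list:
--             return helper(d[0])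
--     dictionary = helper(dictionary)
--     while dictionary[1]:
--         dictionary = helper(dictionary)
--     dictionary = dictionary[0]
--     if not cont:
--         return dictionary
--     for key, values in dictionary.items():
--         if key in values:
--             values.remove(key)
--     return reduce_to_cycles(dictionary, False)
-- ===== SOURCE B (Python) =====
-- def _drop_first_occurrences(vs, targets):
--     """Return vs with the first occurrence of each element of targets deleted."""
--     pending = set(targets)
--     out = []
--     for v in vs:
--         if v in pending:
--             pending.discard(v)
--         else:
--             out.append(v)
--     return out
--
--
-- def _phase(d):
--     """Discard, to a fixpoint, every key whose out-list has been fully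
--     cancelled; discarding a key cancels one occurrence of it in every list.
--     Cancellations are tracked with per-key counters instead of rewriting the
--     dict; the surviving dict is rebuilt once at the end."""
--     remaining = {k: len(vs) for k, vs in d.items()}
--     removed = set()
--     while True:
--         newly = [k for k, r in remaining.items() if k not in removed and r == 0]
--         if not newly:
--             break
--         for k in newly:
--             removed.add(k)
--         for j, vs in d.items():
--             if j not in removed:
--                 remaining[j] -= sum(1 for k in newly if k in vs)
--     return {k: _drop_first_occurrences(vs, removed)
--             for k, vs in d.items() if k not in removed}
--
--
-- def reduce_to_cycles(dictionary, cont=True):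
--     d = _phase(dictionary)
--     if not cont:
--         return d
--     d = {k: _drop_first_occurrences(vs, (k,)) for k, vs in d.items()}
--     return _phase(d)
-- ===== Notes on version B (the rewrite author's own statement) =====
-- stated objective: faster
-- what changed: Instead of repeatedly deep-copying the dict and rewriting every value list each pass, B keeps a per-key counter of not-yet-cancelled out-entries and a removed-set, peels keys whose counter hits zero to a fixpoint, and rebuilds the surviving dict in one final pass.
import Mathlib
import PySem

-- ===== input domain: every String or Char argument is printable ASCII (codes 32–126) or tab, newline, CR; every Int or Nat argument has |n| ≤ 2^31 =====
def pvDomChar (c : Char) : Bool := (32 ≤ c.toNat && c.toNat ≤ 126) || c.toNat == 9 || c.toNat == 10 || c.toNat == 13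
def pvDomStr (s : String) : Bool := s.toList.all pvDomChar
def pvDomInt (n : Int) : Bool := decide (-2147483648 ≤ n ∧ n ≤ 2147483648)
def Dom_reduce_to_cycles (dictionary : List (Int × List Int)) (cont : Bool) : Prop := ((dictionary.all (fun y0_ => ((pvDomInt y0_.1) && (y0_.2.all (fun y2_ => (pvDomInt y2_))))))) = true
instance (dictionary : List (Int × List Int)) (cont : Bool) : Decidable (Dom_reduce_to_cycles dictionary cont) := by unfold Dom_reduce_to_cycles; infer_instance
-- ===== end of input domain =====

-- B replaces A's repeated deepcopy-and-rewrite passes by per-key counters of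
-- not-yet-cancelled out-entries plus a removed-set, rebuilding the dict once.

-- ===== PORT A =====

-- `if key in values0: values0.remove(key)` — list.remove deletes the first occurrence
def pvEraseOcc (key : Int) (v : List Int) : List Int :=
  if key ∈ v then v.erase key else v

-- `d1.pop(key)`: removes the (unique) entry with this key; exact for the
-- duplicate-free key lists that represent Python dicts (Pre_ below)
def pvPopKey (d : List (Int × List Int)) (k : Int) : List (Int × List Int) :=
  match d with
  | [] => []
  | kv :: rest => if kv.1 = k then rest else kv :: pvPopKey rest k

-- one call of `helper` on a dict: fold over d's items with state (d1, o)
def pvPass (d : List (Int × List Int)) : List (Int × List Int) × Bool :=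
  d.foldl (fun st kv =>
    if kv.2 = [] then
      (pvPopKey (st.1.map (fun kv0 => (kv0.1, pvEraseOcc kv.1 kv0.2))) kv.1, true)
    else st) (d, false)

-- `dictionary = helper(dictionary); while dictionary[1]: …`; fuel guard only:
-- d.length + 1 passes always suffice, since a pass reporting True pops a key
def pvLoopA : Nat → List (Int × List Int) → List (Int × List Int)
  | 0, d => d
  | n+1, d => let r := pvPass d; if r.2 then pvLoopA n r.1 else r.1

-- `for key, values in dictionary.items(): if key in values: values.remove(key)`
def pvStripSelf (d : List (Int × List Int)) : List (Int × List Int) :=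
  d.map (fun kv => (kv.1, pvEraseOcc kv.1 kv.2))

-- `return reduce_to_cycles(dictionary, False)`: the one-step recursion on cont
-- is unfolded into the `true` branch (the False call is its `false` branch)
def reduce_to_cycles (dictionary : List (Int × List Int)) (cont : Bool) : List (Int × List Int) :=
  match cont with
  | false => pvLoopA (dictionary.length + 1) dictionary
  | true =>
    let y := pvStripSelf (pvLoopA (dictionary.length + 1) dictionary)
    pvLoopA (y.length + 1) y

-- ===== PORT B =====

-- `_drop_first_occurrences(vs, targets)`: `pending.discard(v)` on the
-- duplicate-free pending set is List.erase of its single occurrence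
def pvDropFirst (pending : List Int) (vs : List Int) : List Int :=
  match vs with
  | [] => []
  | v :: rest =>
    if v ∈ pending then pvDropFirst (pending.erase v) rest
    else v :: pvDropFirst pending rest

-- `newly = [k for k, r in remaining.items() if k not in removed and r == 0]`
def pvNewly (remaining : List (Int × Int)) (removed : List Int) : List Int :=
  (remaining.filter (fun kv => !PySem.Set.contains removed kv.1 && kv.2 == 0)).map Prod.fst

-- `remaining[j] -= c`: in-place update of the (unique) entry with key j
def pvDecKey (rem : List (Int × Int)) (j : Int) (c : Int) : List (Int × Int) :=
  match rem with
  | [] => []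
  | kv :: rest => if kv.1 = j then (kv.1, kv.2 - c) :: rest else kv :: pvDecKey rest j c

-- the `while True` counter loop; fuel guard only (every round removes a key)
def pvLoopB : Nat → List (Int × List Int) → List (Int × Int) → List Int → List Int
  | 0, _, _, removed => removed
  | n+1, d, remaining, removed =>
    let newly := pvNewly remaining removed
    if newly = [] then removed
    else
      let removed' := newly.foldl (fun s k => PySem.Set.add s k) removed
      let remaining' := d.foldl (fun rem kv =>
        if PySem.Set.contains removed' kv.1 then rem
        else pvDecKey rem kv.1 ((newly.filter (fun k => decide (k ∈ kv.2))).length : Int)) remaining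
      pvLoopB n d remaining' removed'

def pvPhase (d : List (Int × List Int)) : List (Int × List Int) :=
  let remaining := d.map (fun kv => (kv.1, (kv.2.length : Int)))
  let removed := pvLoopB (d.length + 1) d remaining []
  (d.filter (fun kv => !PySem.Set.contains removed kv.1)).map
    (fun kv => (kv.1, pvDropFirst removed kv.2))

def reduce_to_cycles_alt (dictionary : List (Int × List Int)) (cont : Bool) : List (Int × List Int) :=
  let d := pvPhase dictionary
  if !cont then d
  else pvPhase (d.map (fun kv => (kv.1, pvDropFirst [kv.1] kv.2)))

-- ===== PRECONDITION & SPEC =====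

-- Pre_ excludes association lists with duplicate keys: a Python dict cannot
-- hold duplicate keys, so such lists denote no input of A.
def Pre_reduce_to_cycles (dictionary : List (Int × List Int)) (cont : Bool) : Prop :=
  (dictionary.map Prod.fst).Nodup

instance (dictionary : List (Int × List Int)) (cont : Bool) : Decidable (Pre_reduce_to_cycles dictionary cont) := by unfold Pre_reduce_to_cycles; infer_instance

def pvWitness_reduce_to_cycles : (List (Int × List Int)) × Bool := ([(1, [2]), (2, [1]), (3, [])], true)

def Spec_reduce_to_cycles (dictionary : List (Int × List Int)) (cont : Bool) (out : List (Int × List Int)) : Prop := out = reduce_to_cycles_alt dictionary cont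
instance (dictionary : List (Int × List Int)) (cont : Bool) (out : List (Int × List Int)) : Decidable (Spec_reduce_to_cycles dictionary cont out) := by unfold Spec_reduce_to_cycles; infer_instance

-- ===== CLAIM (what is proved, stated in full; the proofs are below) =====
def Claim_equal_reduce_to_cycles : Prop := ∀ (dictionary : List (Int × List Int)) (cont : Bool), Dom_reduce_to_cycles dictionary cont → Pre_reduce_to_cycles dictionary cont → Spec_reduce_to_cycles dictionary cont (reduce_to_cycles dictionary cont)

-- ===== LEMMAS AND PROOFS =====

def pvKeys (d : List (Int × List Int)) : List Int := d.map Prod.fst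

def pvRebuild (d : List (Int × List Int)) (P : List Int) : List (Int × List Int) :=
  (d.filter (fun kv => decide (kv.1 ∉ P))).map (fun kv => (kv.1, pvDropFirst P kv.2))

def pvNewlyOf (d : List (Int × List Int)) (P : List Int) : List Int :=
  (d.filter (fun kv => decide (kv.1 ∉ P) && decide (pvDropFirst P kv.2 = []))).map Prod.fst

def pvRounds : Nat → List (Int × List Int) → List Int → List Int
  | 0, _, P => P
  | n+1, d, P =>
    let N := pvNewlyOf d P
    if N = [] then P else pvRounds n d (P ++ N)

lemma pvDropFirst_nil (v : List Int) : pvDropFirst [] v = v := by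
  induction v with
  | nil => rfl
  | cons x xs ih => simp [pvDropFirst, ih]

lemma pvEraseOcc_cons (k x : Int) (xs : List Int) :
    pvEraseOcc k (x :: xs) = if x = k then xs else x :: pvEraseOcc k xs := by
  by_cases h : x = k
  · subst h; simp [pvEraseOcc]
  · by_cases h2 : k ∈ xs
    · simp [pvEraseOcc, h, h2, Ne.symm h]
    · simp [pvEraseOcc, h, h2, Ne.symm h]

lemma pvDropFirst_append_single (k : Int) (Q v : List Int) (h : k ∉ Q) :
    pvDropFirst (Q ++ [k]) v = pvEraseOcc k (pvDropFirst Q v) := by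
  induction v generalizing Q with
  | nil => simp [pvDropFirst, pvEraseOcc]
  | cons x xs ih =>
    by_cases hxQ : x ∈ Q
    · have hxk : x ∈ Q ++ [k] := by simp [hxQ]
      rw [pvDropFirst, if_pos hxk, List.erase_append_left _ hxQ,
        ih (Q.erase x) (fun hk => h (List.mem_of_mem_erase hk)),
        pvDropFirst, if_pos hxQ]
    · by_cases hxk : x = k
      · subst hxk
        have h1 : x ∈ Q ++ [x] := by simp
        rw [pvDropFirst, if_pos h1, List.erase_append_right _ h]
        simp only [List.erase_cons_head, List.append_nil]
        rw [pvDropFirst, if_neg hxQ, pvEraseOcc_cons, if_pos rfl]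
      · have h1 : x ∉ Q ++ [k] := by simp [hxQ, hxk]
        rw [pvDropFirst, if_neg h1, ih Q h, pvDropFirst, if_neg hxQ,
          pvEraseOcc_cons, if_neg hxk]

lemma pvDropFirst_cons_pending (k : Int) (N u : List Int) (h : k ∉ N) :
    pvDropFirst (k :: N) u = pvDropFirst N (pvEraseOcc k u) := by
  induction u generalizing N with
  | nil => simp [pvDropFirst, pvEraseOcc]
  | cons x xs ih =>
    by_cases hxk : x = k
    · subst hxk
      have h1 : x ∈ x :: N := by simp
      rw [pvDropFirst, if_pos h1, List.erase_cons_head, pvEraseOcc_cons, if_pos rfl]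
    · rw [pvEraseOcc_cons, if_neg hxk]
      by_cases hxN : x ∈ N
      · have h1 : x ∈ k :: N := by simp [hxN]
        rw [pvDropFirst, if_pos h1, List.erase_cons_tail (by simp [Ne.symm hxk]),
          ih (N.erase x) (fun hk => h (List.mem_of_mem_erase hk)),
          pvDropFirst, if_pos hxN]
      · have h1 : x ∉ k :: N := by simp [hxN, hxk]
        rw [pvDropFirst, if_neg h1, ih N h, pvDropFirst, if_neg hxN]

lemma pvDropFirst_compose (N P v : List Int) (h : (P ++ N).Nodup) :
    pvDropFirst (P ++ N) v = pvDropFirst N (pvDropFirst P v) := by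
  induction N generalizing P with
  | nil => simp [pvDropFirst_nil]
  | cons n N' ih =>
    have hsplit : P ++ n :: N' = (P ++ [n]) ++ N' := by simp
    have h' : ((P ++ [n]) ++ N').Nodup := by rw [← hsplit]; exact h
    rw [List.nodup_append] at h
    obtain ⟨hP, hcons, hdisj⟩ := h
    have hnP : n ∉ P := fun hn => hdisj n hn n (by simp) rfl
    have hnN' : n ∉ N' := by simp [List.nodup_cons] at hcons; exact hcons.1
    rw [hsplit, ih (P ++ [n]) h', pvDropFirst_append_single n P v hnP,
      ← pvDropFirst_cons_pending n N' _ hnN']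

lemma mem_pvDropFirst (k : Int) (P v : List Int) (h : k ∉ P) :
    k ∈ pvDropFirst P v ↔ k ∈ v := by
  induction v generalizing P with
  | nil => simp [pvDropFirst]
  | cons x xs ih =>
    by_cases hx : x ∈ P
    · have hkx : k ≠ x := fun e => h (e ▸ hx)
      rw [pvDropFirst, if_pos hx, ih (P.erase x) (fun hk => h (List.mem_of_mem_erase hk))]
      simp [hkx]
    · rw [pvDropFirst, if_neg hx]
      simp [ih P h]

lemma length_pvEraseOcc (k : Int) (u : List Int) :
    ((pvEraseOcc k u).length : Int) = (u.length : Int) - (if k ∈ u then 1 else 0) := by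
  by_cases h : k ∈ u
  · have h1 := List.length_erase_of_mem h
    have h2 : 0 < u.length := List.length_pos_of_mem h
    simp only [pvEraseOcc, if_pos h, h1]
    omega
  · simp [pvEraseOcc, h]

lemma length_pvDropFirst_append (N P v : List Int) (hN : N.Nodup) (hd : ∀ x ∈ N, x ∉ P) :
    ((pvDropFirst (P ++ N) v).length : Int)
      = ((pvDropFirst P v).length : Int) - ((N.filter (fun k => decide (k ∈ v))).length : Int) := by
  induction N generalizing P with
  | nil => simp
  | cons n N' ih =>
    have hnN' : n ∉ N' := by simp [List.nodup_cons] at hN; exact hN.1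
    have hN' : N'.Nodup := by simp [List.nodup_cons] at hN; exact hN.2
    have hnP : n ∉ P := hd n (by simp)
    have hd' : ∀ x ∈ N', x ∉ P ++ [n] := by
      intro x hx
      simp only [List.mem_append, List.mem_singleton]
      rintro (hxP | rfl)
      · exact hd x (by simp [hx]) hxP
      · exact hnN' hx
    have hsplit : P ++ n :: N' = (P ++ [n]) ++ N' := by simp
    rw [hsplit, ih (P ++ [n]) hN' hd', pvDropFirst_append_single n P v hnP,
      length_pvEraseOcc, List.filter_cons]
    by_cases hnv : n ∈ v
    · rw [if_pos ((mem_pvDropFirst n P v hnP).mpr hnv)]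
      simp only [hnv, decide_true, if_true, List.length_cons]
      push_cast
      omega
    · rw [if_neg (fun hc => hnv ((mem_pvDropFirst n P v hnP).mp hc))]
      simp [hnv]

lemma pvDropFirst_nil_of_extend (N P v : List Int) (h : (P ++ N).Nodup)
    (h0 : pvDropFirst P v = []) : pvDropFirst (P ++ N) v = [] := by
  rw [pvDropFirst_compose N P v h, h0]
  cases N <;> rfl

lemma pvDropFirst_single (k : Int) (v : List Int) :
    pvDropFirst [k] v = pvEraseOcc k v := by
  have := pvDropFirst_append_single k [] v (by simp)
  simpa [pvDropFirst_nil] using this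

-- rebuild basics
lemma pvRebuild_nil (d : List (Int × List Int)) : pvRebuild d [] = d := by
  unfold pvRebuild
  rw [List.filter_eq_self.mpr (by simp)]
  rw [List.map_congr_left (fun kv _ => by rw [pvDropFirst_nil])]
  have hid : (fun kv : Int × List Int => (kv.1, kv.2)) = id := funext (fun kv => rfl)
  rw [hid, List.map_id]

lemma pvKeys_rebuild_sublist (d : List (Int × List Int)) (P : List Int) :
    (pvKeys (pvRebuild d P)).Sublist (pvKeys d) := by
  have : pvKeys (pvRebuild d P) = (d.filter (fun kv => decide (kv.1 ∉ P))).map Prod.fst := by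
    simp [pvRebuild, pvKeys, List.map_map]
  rw [this]
  exact List.filter_sublist.map Prod.fst

lemma pvNewlyOf_nodup (d : List (Int × List Int)) (P : List Int) (hnd : (pvKeys d).Nodup) :
    (pvNewlyOf d P).Nodup := by
  have hsub : (pvNewlyOf d P).Sublist (pvKeys d) := by
    have h1 : pvNewlyOf d P = (d.filter
        (fun kv => decide (kv.1 ∉ P) && decide (pvDropFirst P kv.2 = []))).map Prod.fst := rfl
    rw [h1]
    exact List.filter_sublist.map Prod.fst
  exact hnd.sublist hsub

lemma pvNewlyOf_disjoint (d : List (Int × List Int)) (P : List Int) :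
    ∀ k ∈ pvNewlyOf d P, k ∉ P := by
  intro k hk
  simp only [pvNewlyOf, List.mem_map, List.mem_filter] at hk
  obtain ⟨kv, ⟨hm, hc⟩, rfl⟩ := hk
  simp only [Bool.and_eq_true, decide_eq_true_eq] at hc
  exact hc.1

lemma pvNewlyOf_subset_keys (d : List (Int × List Int)) (P : List Int) :
    ∀ k ∈ pvNewlyOf d P, k ∈ pvKeys d := by
  intro k hk
  simp only [pvNewlyOf, List.mem_map, List.mem_filter] at hk
  obtain ⟨kv, ⟨hm, hc⟩, rfl⟩ := hk
  exact List.mem_map_of_mem hm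

lemma pvNewlyOf_empty_val (d : List (Int × List Int)) (P : List Int) (hnd : (pvKeys d).Nodup)
    (kv : Int × List Int) (hm : kv ∈ d) (hk : kv.1 ∈ pvNewlyOf d P) :
    pvDropFirst P kv.2 = [] := by
  simp only [pvNewlyOf, List.mem_map, List.mem_filter] at hk
  obtain ⟨kv', ⟨hm', hc⟩, hfst⟩ := hk
  simp only [Bool.and_eq_true, decide_eq_true_eq] at hc
  have : kv' = kv := by
    clear hc
    induction d with
    | nil => cases hm
    | cons a rest ih =>
      simp only [pvKeys, List.map_cons, List.nodup_cons] at hnd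
      rcases List.mem_cons.mp hm with rfl | hm2
      · rcases List.mem_cons.mp hm' with rfl | hm2'
        · rfl
        · exact absurd (hfst ▸ List.mem_map_of_mem (f := Prod.fst) hm2') hnd.1
      · rcases List.mem_cons.mp hm' with rfl | hm2'
        · exact absurd (List.mem_map_of_mem (f := Prod.fst) hm2) (hfst ▸ hnd.1)
        · exact ih hnd.2 hm2 hm2'
  rw [← this]; exact hc.2

lemma pvRebuild_cons (kv : Int × List Int) (rest : List (Int × List Int)) (P : List Int) :
    pvRebuild (kv :: rest) P
      = if kv.1 ∈ P then pvRebuild rest P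
        else (kv.1, pvDropFirst P kv.2) :: pvRebuild rest P := by
  by_cases h : kv.1 ∈ P <;> simp [pvRebuild, List.filter_cons, h]

lemma pvNewlyOf_cons (kv : Int × List Int) (rest : List (Int × List Int)) (P : List Int) :
    pvNewlyOf (kv :: rest) P
      = if kv.1 ∉ P ∧ pvDropFirst P kv.2 = [] then kv.1 :: pvNewlyOf rest P
        else pvNewlyOf rest P := by
  by_cases h1 : kv.1 ∈ P <;> by_cases h2 : pvDropFirst P kv.2 = [] <;>
    simp [pvNewlyOf, List.filter_cons, h1, h2]

lemma keys_nodup_of_sublist {d2 d : List (Int × List Int)} (h : d2.Sublist d)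
    (hnd : (pvKeys d).Nodup) : (pvKeys d2).Nodup :=
  hnd.sublist (h.map Prod.fst)

-- A-side: one pass characterised
lemma map_eraseOcc_rebuild (d : List (Int × List Int)) (P : List Int) (k : Int)
    (hk : k ∉ pvKeys d) (hP : k ∉ P) :
    (pvRebuild d P).map (fun kv0 => (kv0.1, pvEraseOcc k kv0.2)) = pvRebuild d (P ++ [k]) := by
  induction d with
  | nil => rfl
  | cons kv rest ih =>
    simp only [pvKeys, List.map_cons, List.mem_cons, not_or] at hk
    by_cases hkvP : kv.1 ∈ P
    · have h2 : kv.1 ∈ P ++ [k] := by simp [hkvP]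
      simp only [pvRebuild, List.filter_cons, decide_eq_true_eq]
      rw [if_neg (by simp [hkvP]), if_neg (by simp [h2])]
      exact ih (by simpa [pvKeys] using hk.2)
    · have hkkv : ¬ kv.1 = k := fun e => hk.1 e.symm
      have h2 : kv.1 ∉ P ++ [k] := by simp [hkvP, hkkv]
      simp only [pvRebuild, List.filter_cons, decide_eq_true_eq]
      rw [if_pos (by simp [hkvP]), if_pos (by simp [h2])]
      simp only [List.map_cons]
      have hrest := ih (by simpa [pvKeys] using hk.2)
      simp only [pvRebuild] at hrest
      rw [hrest, pvDropFirst_append_single k P kv.2 hP]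

lemma pop_map_eraseOcc_rebuild (d : List (Int × List Int)) (P : List Int) (k : Int)
    (hnd : (pvKeys d).Nodup) (hk : k ∈ pvKeys d) (hP : k ∉ P) :
    pvPopKey ((pvRebuild d P).map (fun kv0 => (kv0.1, pvEraseOcc k kv0.2))) k
      = pvRebuild d (P ++ [k]) := by
  induction d with
  | nil => simp [pvKeys] at hk
  | cons kv rest ih =>
    simp only [pvKeys, List.map_cons, List.nodup_cons] at hnd
    by_cases hkv : kv.1 = k
    · subst hkv
      have hknr : kv.1 ∉ pvKeys rest := by simpa [pvKeys] using hnd.1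
      simp only [pvRebuild, List.filter_cons, decide_eq_true_eq]
      rw [if_pos (by simp [hP]), if_neg (by simp : ¬ (kv.1 ∉ P ++ [kv.1]))]
      simp only [List.map_cons]
      rw [pvPopKey, if_pos rfl]
      have := map_eraseOcc_rebuild rest P kv.1 hknr hP
      simp only [pvRebuild] at this ⊢
      exact this
    · have hk2 : k ∈ pvKeys rest := by
        simp only [pvKeys, List.map_cons, List.mem_cons] at hk
        rcases hk with h | h
        · exact absurd h.symm hkv
        · exact h
      by_cases hkvP : kv.1 ∈ P
      · simp only [pvRebuild, List.filter_cons, decide_eq_true_eq]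
        rw [if_neg (by simp [hkvP]), if_neg (by simp [hkvP])]
        exact ih hnd.2 hk2
      · simp only [pvRebuild, List.filter_cons, decide_eq_true_eq]
        rw [if_pos (by simp [hkvP]), if_pos (by simp [hkvP, hkv])]
        simp only [List.map_cons]
        rw [pvPopKey, if_neg hkv]
        have hr := ih hnd.2 hk2
        simp only [pvRebuild] at hr
        rw [hr, pvDropFirst_append_single k P kv.2 hP]

lemma pvPass_aux (d : List (Int × List Int)) (hnd : (pvKeys d).Nodup) (P : List Int) :
    ∀ (d2 : List (Int × List Int)) (Q : List Int) (b : Bool),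
      d2.Sublist d → (P ++ Q).Nodup →
      (∀ k ∈ Q, k ∈ pvKeys d) → (∀ k ∈ Q, k ∉ pvKeys d2) →
      List.foldl (fun st kv =>
          if kv.2 = ([] : List Int) then
            (pvPopKey (st.1.map (fun kv0 => (kv0.1, pvEraseOcc kv.1 kv0.2))) kv.1, true)
          else st) (pvRebuild d (P ++ Q), b) (pvRebuild d2 P)
        = (pvRebuild d (P ++ Q ++ pvNewlyOf d2 P), b || !(pvNewlyOf d2 P).isEmpty) := by
  intro d2 Q b hsub hQnd hQk hQd2
  induction d2 generalizing Q b with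
  | nil =>
    simp only [pvRebuild, List.filter_nil, List.map_nil, List.foldl_nil, pvNewlyOf,
      List.append_nil, List.isEmpty_nil, Bool.not_true, Bool.or_false]
  | cons kv rest ih =>
    have hrest : rest.Sublist d := (List.sublist_cons_self kv rest).trans hsub
    have hkvd : kv ∈ d := hsub.subset (by simp)
    have hndc : (pvKeys (kv :: rest)).Nodup := keys_nodup_of_sublist hsub hnd
    have hkvrest : kv.1 ∉ pvKeys rest := by
      simp only [pvKeys, List.map_cons, List.nodup_cons] at hndc
      simpa [pvKeys] using hndc.1
    rw [pvRebuild_cons, pvNewlyOf_cons]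
    by_cases hkvP : kv.1 ∈ P
    · rw [if_pos hkvP, if_neg (by simp [hkvP])]
      exact ih Q b hrest hQnd hQk (fun k hk => by
        have := hQd2 k hk
        simp only [pvKeys, List.map_cons, List.mem_cons, not_or] at this
        exact this.2)
    · rw [if_neg hkvP, List.foldl_cons]
      dsimp only
      have hkvQ : kv.1 ∉ Q := fun hm => (hQd2 kv.1 hm) (by simp [pvKeys])
      have hkvPQ : kv.1 ∉ P ++ Q := by simp [hkvP, hkvQ]
      by_cases hE : pvDropFirst P kv.2 = []
      · rw [if_pos hE, if_pos ⟨hkvP, hE⟩,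
          pop_map_eraseOcc_rebuild d (P ++ Q) kv.1 hnd (List.mem_map_of_mem hkvd) hkvPQ]
        have hQnd' : (P ++ (Q ++ [kv.1])).Nodup := by
          rw [← List.append_assoc, List.nodup_append]
          refine ⟨hQnd, List.nodup_singleton _, ?_⟩
          intro a ha b hb
          simp only [List.mem_singleton] at hb
          subst hb
          exact fun e => hkvPQ (e ▸ ha)
        have hQk' : ∀ k ∈ Q ++ [kv.1], k ∈ pvKeys d := by
          intro k hk
          rcases List.mem_append.mp hk with h | h
          · exact hQk k h
          · simp only [List.mem_singleton] at h; subst h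
            exact List.mem_map_of_mem hkvd
        have hQd2' : ∀ k ∈ Q ++ [kv.1], k ∉ pvKeys rest := by
          intro k hk
          rcases List.mem_append.mp hk with h | h
          · have := hQd2 k h
            simp only [pvKeys, List.map_cons, List.mem_cons, not_or] at this
            exact this.2
          · simp only [List.mem_singleton] at h; subst h
            exact hkvrest
        have hih := ih (Q ++ [kv.1]) true hrest hQnd' hQk' hQd2'
        have happ : P ++ (Q ++ [kv.1]) = (P ++ Q) ++ [kv.1] := (List.append_assoc P Q [kv.1]).symm
        rw [happ] at hih
        rw [hih]
        simp [List.append_assoc]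
      · rw [if_neg hE, if_neg (by simp [hE])]
        exact ih Q b hrest hQnd hQk (fun k hk => by
          have := hQd2 k hk
          simp only [pvKeys, List.map_cons, List.mem_cons, not_or] at this
          exact this.2)

lemma pvPass_rebuild (d : List (Int × List Int)) (P : List Int)
    (hnd : (pvKeys d).Nodup) (hP : P.Nodup) :
    pvPass (pvRebuild d P) = (pvRebuild d (P ++ pvNewlyOf d P), !(pvNewlyOf d P).isEmpty) := by
  have h := pvPass_aux d hnd P d [] false (List.Sublist.refl d)
    (by simpa using hP) (by simp) (by simp)
  unfold pvPass
  simpa using h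

lemma pvLoopA_rounds (d : List (Int × List Int)) (hnd : (pvKeys d).Nodup) :
    ∀ (n : Nat) (P : List Int), P.Nodup →
      pvLoopA n (pvRebuild d P) = pvRebuild d (pvRounds n d P) := by
  intro n
  induction n with
  | zero => intro P hP; rfl
  | succ n ih =>
    intro P hP
    rw [pvLoopA, pvRounds]
    rw [pvPass_rebuild d P hnd hP]
    by_cases hN : pvNewlyOf d P = []
    · simp [hN]
    · have hne : (pvNewlyOf d P).isEmpty = false := by
        cases h : pvNewlyOf d P
        · exact absurd h hN
        · rfl
      have hPN : (P ++ pvNewlyOf d P).Nodup := by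
        rw [List.nodup_append]
        exact ⟨hP, pvNewlyOf_nodup d P hnd,
          fun a ha b hb e => (pvNewlyOf_disjoint d P b hb) (e ▸ ha)⟩
      simp only [hne, Bool.not_false, if_true, hN]
      exact ih (P ++ pvNewlyOf d P) hPN

-- B-side
lemma pvNewly_eq (d : List (Int × List Int)) (P : List Int) :
    pvNewly (d.map (fun kv => (kv.1, ((pvDropFirst P kv.2).length : Int)))) P
      = pvNewlyOf d P := by
  induction d with
  | nil => rfl
  | cons kv rest ih =>
    have hhead : (!PySem.Set.contains P kv.1 && (((pvDropFirst P kv.2).length : Int) == 0))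
        = (decide (kv.1 ∉ P) && decide (pvDropFirst P kv.2 = [])) := by
      have h1 : (!PySem.Set.contains P kv.1) = decide (kv.1 ∉ P) := by
        simp [PySem.Set.contains]
      have h2 : ((((pvDropFirst P kv.2).length : Int)) == 0)
          = decide (pvDropFirst P kv.2 = []) := by
        by_cases he : pvDropFirst P kv.2 = []
        · simp [he]
        · simp [he, List.length_eq_zero_iff]
      rw [h1, h2]
    simp only [pvNewly, List.map_cons, List.filter_cons] at ih ⊢
    rw [hhead]
    by_cases hm : kv.1 ∈ P <;> by_cases he : pvDropFirst P kv.2 = []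
    · have hc : (decide (kv.1 ∉ P) && decide (pvDropFirst P kv.2 = [])) = false := by
        simp [hm]
      rw [hc, pvNewlyOf_cons,
        if_neg (show ¬(kv.1 ∉ P ∧ pvDropFirst P kv.2 = []) from fun hcon => hcon.1 hm)]
      simpa using ih
    · have hc : (decide (kv.1 ∉ P) && decide (pvDropFirst P kv.2 = [])) = false := by
        simp [hm]
      rw [hc, pvNewlyOf_cons,
        if_neg (show ¬(kv.1 ∉ P ∧ pvDropFirst P kv.2 = []) from fun hcon => hcon.1 hm)]
      simpa using ih
    · have hc : (decide (kv.1 ∉ P) && decide (pvDropFirst P kv.2 = [])) = true := by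
        simp [hm, he]
      rw [hc, pvNewlyOf_cons,
        if_pos (show kv.1 ∉ P ∧ pvDropFirst P kv.2 = [] from ⟨hm, he⟩)]
      simpa using ih
    · have hc : (decide (kv.1 ∉ P) && decide (pvDropFirst P kv.2 = [])) = false := by
        simp [hm, he]
      rw [hc, pvNewlyOf_cons,
        if_neg (show ¬(kv.1 ∉ P ∧ pvDropFirst P kv.2 = []) from fun hcon => he hcon.2)]
      simpa using ih

lemma pvDecKey_append (pre : List (Int × Int)) (j : Int) (x c : Int) (rest : List (Int × Int))
    (h : j ∉ pre.map Prod.fst) :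
    pvDecKey (pre ++ (j, x) :: rest) j c = pre ++ (j, x - c) :: rest := by
  induction pre with
  | nil => simp [pvDecKey]
  | cons p pre' ih =>
    simp only [List.map_cons, List.mem_cons, not_or] at h
    simp only [List.cons_append, pvDecKey]
    rw [ih h.2]
    exact if_neg (fun e => h.1 e.symm)

lemma foldl_dec (f g : (Int × List Int) → Int × Int)
    (c : (Int × List Int) → Bool) (cnt : (Int × List Int) → Int) :
    ∀ (d2 : List (Int × List Int)) (pre : List (Int × Int)),
      (d2.map Prod.fst).Nodup → (∀ k ∈ d2.map Prod.fst, k ∉ pre.map Prod.fst) →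
      (∀ kv ∈ d2, (f kv).1 = kv.1 ∧ (g kv).1 = kv.1 ∧
        (if c kv then g kv = f kv else g kv = (kv.1, (f kv).2 - cnt kv))) →
      d2.foldl (fun rem kv => if c kv then rem else pvDecKey rem kv.1 (cnt kv))
          (pre ++ d2.map f)
        = pre ++ d2.map g := by
  intro d2
  induction d2 with
  | nil => intro pre _ _ _; simp
  | cons kv rest ih =>
    intro pre hnd hdisj hfg
    simp only [List.map_cons, List.nodup_cons] at hnd
    obtain ⟨hf1, hg1, hrel⟩ := hfg kv (by simp)
    have hdisj' : ∀ k ∈ rest.map Prod.fst, k ∉ pre.map Prod.fst :=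
      fun k hk => hdisj k (by simp [hk])
    have hfg' : ∀ kv' ∈ rest, (f kv').1 = kv'.1 ∧ (g kv').1 = kv'.1 ∧
        (if c kv' then g kv' = f kv' else g kv' = (kv'.1, (f kv').2 - cnt kv')) :=
      fun kv' h => hfg kv' (by simp [h])
    simp only [List.map_cons, List.foldl_cons]
    by_cases hc : c kv = true
    · rw [if_pos hc] at hrel ⊢
      have : pre ++ f kv :: rest.map f = (pre ++ [f kv]) ++ rest.map f := by simp
      rw [this]
      have hdisj2 : ∀ k ∈ rest.map Prod.fst, k ∉ (pre ++ [f kv]).map Prod.fst := by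
        intro k hk
        simp only [List.map_append, List.map_cons, List.map_nil, List.mem_append,
          List.mem_singleton, not_or]
        exact ⟨hdisj' k hk, by rw [hf1]; exact fun e => hnd.1 (e ▸ hk)⟩
      rw [ih (pre ++ [f kv]) hnd.2 hdisj2 hfg']
      simp [hrel]
    · rw [if_neg hc] at hrel ⊢
      have hfkv : f kv = (kv.1, (f kv).2) := by
        rw [← hf1]
      rw [hfkv, pvDecKey_append pre kv.1 (f kv).2 (cnt kv) (rest.map f)
        (fun hm => hdisj kv.1 (by simp) hm)]
      have : pre ++ (kv.1, (f kv).2 - cnt kv) :: rest.map f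
          = (pre ++ [g kv]) ++ rest.map f := by simp [hrel]
      rw [this]
      have hdisj2 : ∀ k ∈ rest.map Prod.fst, k ∉ (pre ++ [g kv]).map Prod.fst := by
        intro k hk
        simp only [List.map_append, List.map_cons, List.map_nil, List.mem_append,
          List.mem_singleton, not_or]
        exact ⟨hdisj' k hk, by rw [hg1]; exact fun e => hnd.1 (e ▸ hk)⟩
      rw [ih (pre ++ [g kv]) hnd.2 hdisj2 hfg']
      simp

lemma pvLoopB_rounds (d : List (Int × List Int)) (hnd : (pvKeys d).Nodup) :
    ∀ (n : Nat) (P : List Int), P.Nodup → (∀ k ∈ P, k ∈ pvKeys d) →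
      (∀ kv ∈ d, kv.1 ∈ P → pvDropFirst P kv.2 = []) →
      pvLoopB n d (d.map (fun kv => (kv.1, ((pvDropFirst P kv.2).length : Int)))) P
        = pvRounds n d P := by
  intro n
  induction n with
  | zero => intro P hP hPk hEmpty; rfl
  | succ n ih =>
    intro P hP hPk hEmpty
    rw [pvLoopB, pvRounds]
    simp only [pvNewly_eq d P]
    by_cases h : pvNewlyOf d P = []
    · simp [h]
    · simp only [if_neg h]
      have hNnd := pvNewlyOf_nodup d P hnd
      have hNP : ∀ x ∈ pvNewlyOf d P, x ∉ P := pvNewlyOf_disjoint d P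
      have hPNnd : (P ++ pvNewlyOf d P).Nodup := by
        rw [List.nodup_append]
        exact ⟨hP, hNnd, fun a ha b hb e => (hNP b hb) (e ▸ ha)⟩
      have hfold : (pvNewlyOf d P).foldl (fun s k => PySem.Set.add s k) P
          = P ++ pvNewlyOf d P :=
        PySem.Set.update_eq_append_of_disjoint P (pvNewlyOf d P) hNnd hNP
      rw [hfold]
      have hfg : ∀ kv ∈ d,
          ((fun kv : Int × List Int => (kv.1, ((pvDropFirst P kv.2).length : Int))) kv).1 = kv.1 ∧
          ((fun kv : Int × List Int => (kv.1, ((pvDropFirst (P ++ pvNewlyOf d P) kv.2).length : Int))) kv).1 = kv.1 ∧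
          (if (fun kv : Int × List Int => PySem.Set.contains (P ++ pvNewlyOf d P) kv.1) kv then
            (fun kv : Int × List Int => (kv.1, ((pvDropFirst (P ++ pvNewlyOf d P) kv.2).length : Int))) kv
              = (fun kv : Int × List Int => (kv.1, ((pvDropFirst P kv.2).length : Int))) kv
          else (fun kv : Int × List Int => (kv.1, ((pvDropFirst (P ++ pvNewlyOf d P) kv.2).length : Int))) kv
              = (kv.1, ((fun kv : Int × List Int => (kv.1, ((pvDropFirst P kv.2).length : Int))) kv).2
                  - (fun kv : Int × List Int => (((pvNewlyOf d P).filter (fun k => decide (k ∈ kv.2))).length : Int)) kv)) := by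
        intro kv hm
        refine ⟨rfl, rfl, ?_⟩
        by_cases hmem : kv.1 ∈ P ++ pvNewlyOf d P
        · rw [if_pos (by simpa [PySem.Set.contains] using hmem)]
          have hPe : pvDropFirst P kv.2 = [] := by
            rcases List.mem_append.mp hmem with hp | hn
            · exact hEmpty kv hm hp
            · exact pvNewlyOf_empty_val d P hnd kv hm hn
          have hPNe : pvDropFirst (P ++ pvNewlyOf d P) kv.2 = [] :=
            pvDropFirst_nil_of_extend _ _ _ hPNnd hPe
          simp [hPe, hPNe]
        · rw [if_neg (by simpa [PySem.Set.contains] using hmem)]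
          simp only []
          rw [length_pvDropFirst_append (pvNewlyOf d P) P kv.2 hNnd hNP]
      have hmap := foldl_dec
        (fun kv : Int × List Int => (kv.1, ((pvDropFirst P kv.2).length : Int)))
        (fun kv : Int × List Int => (kv.1, ((pvDropFirst (P ++ pvNewlyOf d P) kv.2).length : Int)))
        (fun kv : Int × List Int => PySem.Set.contains (P ++ pvNewlyOf d P) kv.1)
        (fun kv : Int × List Int => (((pvNewlyOf d P).filter (fun k => decide (k ∈ kv.2))).length : Int))
        d [] hnd (by simp) hfg
      simp only [List.nil_append] at hmap
      rw [hmap]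
      refine ih (P ++ pvNewlyOf d P) hPNnd ?_ ?_
      · intro k hk
        rcases List.mem_append.mp hk with hp | hn
        · exact hPk k hp
        · exact pvNewlyOf_subset_keys d P k hn
      · intro kv hm hmem
        have hPe : pvDropFirst P kv.2 = [] := by
          rcases List.mem_append.mp hmem with hp | hn
          · exact hEmpty kv hm hp
          · exact pvNewlyOf_empty_val d P hnd kv hm hn
        exact pvDropFirst_nil_of_extend _ _ _ hPNnd hPe

lemma pvPhase_eq_rebuild (d : List (Int × List Int)) (hnd : (pvKeys d).Nodup) :
    pvPhase d = pvRebuild d (pvRounds (d.length + 1) d []) := by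
  have h0 : d.map (fun kv => (kv.1, (kv.2.length : Int)))
      = d.map (fun kv => (kv.1, ((pvDropFirst [] kv.2).length : Int))) :=
    List.map_congr_left (fun kv _ => by rw [pvDropFirst_nil])
  have hphase : pvPhase d = (d.filter (fun kv =>
      !PySem.Set.contains (pvLoopB (d.length + 1) d
        (d.map (fun kv => (kv.1, (kv.2.length : Int)))) []) kv.1)).map
      (fun kv => (kv.1, pvDropFirst (pvLoopB (d.length + 1) d
        (d.map (fun kv => (kv.1, (kv.2.length : Int)))) []) kv.2)) := rfl
  rw [hphase, h0, pvLoopB_rounds d hnd (d.length + 1) [] List.nodup_nil (by simp) (by simp)]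
  have h1 : ∀ kv : Int × List Int,
      (!PySem.Set.contains (pvRounds (d.length + 1) d []) kv.1)
        = decide (kv.1 ∉ pvRounds (d.length + 1) d []) := by
    intro kv; simp [PySem.Set.contains]
  rw [List.filter_congr (fun kv _ => h1 kv)]
  rfl

lemma pvLoopA_eq_pvPhase (d : List (Int × List Int)) (hnd : (pvKeys d).Nodup) :
    pvLoopA (d.length + 1) d = pvPhase d := by
  have h := pvLoopA_rounds d hnd (d.length + 1) [] List.nodup_nil
  rw [pvRebuild_nil] at h
  rw [h, pvPhase_eq_rebuild d hnd]

lemma pvStripSelf_eq (d : List (Int × List Int)) :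
    pvStripSelf d = d.map (fun kv => (kv.1, pvDropFirst [kv.1] kv.2)) := by
  unfold pvStripSelf
  exact List.map_congr_left (fun kv _ => by rw [pvDropFirst_single])

lemma pvKeys_stripSelf (d : List (Int × List Int)) :
    pvKeys (pvStripSelf d) = pvKeys d := by
  simp [pvKeys, pvStripSelf, List.map_map]

-- ===== VERDICT (by name: the statement is the Claim_ definition above) =====
theorem reduce_to_cycles_spec : Claim_equal_reduce_to_cycles := by
  intro d cont hdom hpre
  unfold Spec_reduce_to_cycles
  have hnd : (pvKeys d).Nodup := hpre
  cases cont with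
  | false =>
    unfold reduce_to_cycles reduce_to_cycles_alt
    simp only [Bool.not_false, if_true]
    exact pvLoopA_eq_pvPhase d hnd
  | true =>
    unfold reduce_to_cycles reduce_to_cycles_alt
    simp only [Bool.not_true]
    rw [pvLoopA_eq_pvPhase d hnd, ← pvStripSelf_eq]
    have hnd2 : (pvKeys (pvPhase d)).Nodup := by
      rw [pvPhase_eq_rebuild d hnd]
      exact hnd.sublist (pvKeys_rebuild_sublist d _)
    have hnd3 : (pvKeys (pvStripSelf (pvPhase d))).Nodup := by
      rw [pvKeys_stripSelf]; exact hnd2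
    exact pvLoopA_eq_pvPhase _ hnd3
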